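-- pv_equiv track=rewrite | github.com/milith0kun/RepicacionBio | ovo/ovo/pipelines/rfdiffusion-backbone/bin/standardize_pdb.py | order_designed_contig
-- ===== SOURCE A (Python) =====
-- def is_designed(contig_chain_or_segment: str) -> bool:
--     """
--     Check if the contig chain is fixed or not.
--     :param contig_chain: str, the contig chain string
--     :return: bool, True if designed, False if is fixed
--     """
--     for segment in contig_chain_or_segment.removesuffix("/0").split("/"):
--         if not segment[0].isalpha():
--             return True
--     return False
--
-- def order_designed_contig(contig_chains: list[str], trb_ref_pdb_idx: list[tuple[str, str]]) -> list[str]: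
--     """
--     Order the contig segments by designed and fixed segments. It is needed to guarantee the correct mapping with
--     the output pdb numbering as in the output pdb designed input residues are first listed in A,
--     then fixed residues listed in B.
--     First, create a list with designed + fixed contig segments.
--     Then, scans the segments and check if the segments are ordered correctly comparing with the rfdiffusion output.
--     Example:
--         - input contig_chains [A1-10/10-20/A30-40/0, B23-40/.../0, C10-25] (designed + fixed)
--         - For each contig segment splits it in segments: i.e. A1-10, 10-20, A30-40, B23-40, ...
--             For fixed segments (namely A1-10, A30-40, B23-40) check if the segments are ordered as in the trb ref pdb
--             idx.
--             This latter gets only fixed segments trb_ref_pdb_idx: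
--             [(A, 1), (A, 2), ... (A, 10), (A, 30), (A, 31), ..., (B, 23), (B, 24), ..., (B, 40), ..., (C, 10), (C, 11)
--             ...]
--     """
--     designed_segments, fixed_segments = [], []
--
--     for contig_chain in contig_chains:
--         if is_designed(contig_chain):
--             designed_segments.append(contig_chain)
--         else:
--             fixed_segments.append(contig_chain)
--
--     ordered_contig_chains = designed_segments + fixed_segments
--
--     # SANITY CHECK
--     # Check if the segments are ordered correctly comparing with the rfdiffusion output
--     trb_mask_idx = 0
--     for ordered_contig_chain in ordered_contig_chains:
--         for segment in ordered_contig_chain.removesuffix("/0").split("/"):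
--             # Check if segment is designed
--             if is_designed(segment):
--                 continue
--
--             chain = segment[0]
--             start_resnum, end_resnum = map(int, segment[1:].split("-"))
--             for res_num in range(start_resnum, end_resnum + 1):
--                 if (chain, res_num) != trb_ref_pdb_idx[trb_mask_idx]:
--                     raise ValueError(
--                         f"Mismatch between parsed residue {(chain, res_num)} and "
--                         f"expected rf-diffusion output {trb_ref_pdb_idx[trb_mask_idx]} in the {trb_mask_idx} "
--                         f"trb mask location: check 'trb['complex_con_ref_pdb_idx']'"
--                     )
--                 trb_mask_idx += 1
--
--     return ordered_contig_chains
-- ===== SOURCE B (Python) =====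
-- def _is_designed(chain_or_segment: str) -> bool:
--     return any(not seg[0].isalpha()
--                for seg in chain_or_segment.removesuffix("/0").split("/"))
--
--
-- def _fixed_runs(chains):
--     """Canonical (chain, start, end) runs of the fixed residues: parse the fixed
--     segments in order, drop empty ranges and merge contiguous same-chain segments."""
--     runs = []
--     for chain in chains:
--         for seg in chain.removesuffix("/0").split("/"):
--             if not seg[0].isalpha():
--                 continue
--             start, end = map(int, seg[1:].split("-"))
--             if start > end:
--                 continue
--             if runs and runs[-1][0] == seg[0] and runs[-1][2] + 1 == start:
--                 runs[-1] = (seg[0], runs[-1][1], end)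
--             else:
--                 runs.append((seg[0], start, end))
--     return runs
--
--
-- def _rle(pairs):
--     """Run-length encode (chain, resnum) pairs into canonical (chain, start, end) runs."""
--     runs = []
--     for ch, num in pairs:
--         if runs and runs[-1][0] == ch and runs[-1][2] + 1 == num:
--             runs[-1] = (ch, runs[-1][1], num)
--         else:
--             runs.append((ch, num, num))
--     return runs
--
--
-- def order_designed_contig(contig_chains: list[str], trb_ref_pdb_idx: list[tuple[str, str]]) -> list[str]:
--     ordered = sorted(contig_chains, key=lambda c: 0 if _is_designed(c) else 1)
--     runs = _fixed_runs(ordered)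
--     total = sum(end - start + 1 for _, start, end in runs)
--     if total > len(trb_ref_pdb_idx) or _rle(trb_ref_pdb_idx[:total]) != runs:
--         raise ValueError(
--             "Mismatch between parsed contig residues and expected rf-diffusion "
--             "output: check 'trb['complex_con_ref_pdb_idx']'"
--         )
--     return ordered
-- ===== Notes on version B (the rewrite author's own statement) =====
-- stated objective: alternative
-- what changed: Instead of partitioning with two accumulator lists and replaying every residue of every fixed segment against trb_ref_pdb_idx with a hand-threaded index, B stable-sorts the chains by a designed/fixed key and validates by run-length encoding the reference prefix into canonical (chain,start,end) runs and comparing it to the merged fixed-segment runs, never expanding segments into per-residue tuples.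
import Mathlib
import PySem

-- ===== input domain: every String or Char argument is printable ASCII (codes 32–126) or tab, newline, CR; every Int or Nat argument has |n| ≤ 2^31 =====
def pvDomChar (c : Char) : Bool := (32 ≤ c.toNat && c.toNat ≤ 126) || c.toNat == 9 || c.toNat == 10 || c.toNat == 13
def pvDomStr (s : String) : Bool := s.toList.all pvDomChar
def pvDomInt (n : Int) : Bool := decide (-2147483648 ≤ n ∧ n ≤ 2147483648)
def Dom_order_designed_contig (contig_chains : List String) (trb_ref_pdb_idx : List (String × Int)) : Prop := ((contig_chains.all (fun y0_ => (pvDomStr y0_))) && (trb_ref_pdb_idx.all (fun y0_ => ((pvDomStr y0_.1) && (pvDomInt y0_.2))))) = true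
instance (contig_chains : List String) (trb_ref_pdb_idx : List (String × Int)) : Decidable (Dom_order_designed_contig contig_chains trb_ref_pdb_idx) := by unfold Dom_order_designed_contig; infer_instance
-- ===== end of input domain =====

-- B replaces A's two-accumulator partition loop by a stable sort on a designed/fixed key, and
-- replaces A's per-residue replay of every fixed segment against trb_ref_pdb_idx (hand-threaded
-- index, one comparison per residue tuple) by a run-length comparison: the fixed segments are
-- merged into canonical (chain, start, end) runs and compared with the run-length encoding of
-- the corresponding reference prefix, so no per-residue tuple list is ever generated.  Equal
-- return value proved on Pre_ (alternative algorithm, no speed claim); outside Pre_ both raise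
-- (possibly with different exception types/messages).

-- ----- shared builtin-level helpers (both Pythons call the same builtins) -----

-- s.removesuffix("/0").split("/")
def seg0 (s : List Char) : List (List Char) :=
  PySem.Chars.splitOn (if PySem.Chars.endswith s ['/', '0'] then s.dropLast.dropLast else s) ['/']

-- map(int, segment[1:].split("-")) unpacked into exactly two ints; none = ValueError
def parseSeg (seg : List Char) : Option (Int × Int) :=
  match seg with
  | [] => none
  | _ :: rest =>
    match PySem.Chars.splitOn rest ['-'] with
    | [a, b] =>
      match PySem.Int.ofChars? a, PySem.Int.ofChars? b with
      | some x, some y => some (x, y)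
      | _, _ => none
    | _ => none

-- ===== PORT A =====

-- is_designed: early-return loop over the segments; none = IndexError on an empty segment
def isDesignedLoopA : List (List Char) → Option Bool
  | [] => some false
  | seg :: rest =>
    match seg with
    | [] => none
    | c :: _ => if PySem.Chars.isalpha c then isDesignedLoopA rest else some true

def isDesignedA (s : List Char) : Option Bool := isDesignedLoopA (seg0 s)

-- the partition loop over contig_chains (designed_segments, fixed_segments accumulators)
def partitionA : List String → List String → List String → Option (List String × List String)
  | [], des, fix => some (des, fix)
  | c :: rest, des, fix =>
    match isDesignedA c.toList with
    | none => none
    | some true => partitionA rest (des ++ [c]) fix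
    | some false => partitionA rest des (fix ++ [c])

-- inner 'for res_num in range(start, end+1)' loop threading trb_mask_idx; none = raise
def checkRangeA (trb : List (String × Int)) (c : Char) : List Int → Int → Option Int
  | [], idx => some idx
  | r :: rs, idx =>
    match PySem.List.pyGet? trb idx with
    | none => none
    | some t => if (String.ofList [c], r) = t then checkRangeA trb c rs (idx + 1) else none

-- 'for segment in ordered_contig_chain...split("/")'
def checkSegsA (trb : List (String × Int)) : List (List Char) → Int → Option Int
  | [], idx => some idx
  | seg :: rest, idx =>
    match isDesignedA seg with
    | none => none
    | some true => checkSegsA trb rest idx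
    | some false =>
      match seg with
      | [] => none
      | c :: _ =>
        match parseSeg seg with
        | none => none
        | some (a, b) =>
          match checkRangeA trb c (PySem.List.pyRange a (b + 1) 1) idx with
          | none => none
          | some idx' => checkSegsA trb rest idx'

-- 'for ordered_contig_chain in ordered_contig_chains'
def checkChainsA (trb : List (String × Int)) : List String → Int → Option Int
  | [], idx => some idx
  | chain :: rest, idx =>
    match checkSegsA trb (seg0 chain.toList) idx with
    | none => none
    | some idx' => checkChainsA trb rest idx'

def runA (contig_chains : List String) (trb : List (String × Int)) : Option (List String) :=
  match partitionA contig_chains [] [] with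
  | none => none
  | some (des, fix) =>
    match checkChainsA trb (des ++ fix) 0 with
    | none => none
    | some _ => some (des ++ fix)

def order_designed_contig (contig_chains : List String) (trb_ref_pdb_idx : List (String × Int)) : List String :=
  (runA contig_chains trb_ref_pdb_idx).getD []

-- ===== PORT B =====

-- _is_designed via any(...): short-circuit scan
def anyNotAlphaB : List (List Char) → Option Bool
  | [] => some false
  | seg :: rest =>
    match seg with
    | [] => none
    | c :: _ => if PySem.Chars.isalpha c then anyNotAlphaB rest else some true

def isDesignedB (s : List Char) : Option Bool := anyNotAlphaB (seg0 s)

-- the sort key 'lambda c: 0 if _is_designed(c) else 1' (partial: _is_designed may raise)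
def keyB (s : String) : Option Int :=
  match isDesignedB s.toList with
  | none => none
  | some d => some (if d then 0 else 1)

-- sorted(…, key=f) decorates each element with its key, in list order, then stable-sorts
def decorateB : List String → Option (List (Int × String))
  | [] => some []
  | c :: rest =>
    match keyB c, decorateB rest with
    | some k, some t => some ((k, c) :: t)
    | _, _ => none

def orderedB (cc : List String) : Option (List String) :=
  match decorateB cc with
  | none => none
  | some ps => some ((PySem.List.sorted ps (fun p => p.1)).map Prod.snd)

-- the 'if runs and runs[-1][0] == ch and runs[-1][2] + 1 == s: runs[-1] = … else: runs.append(…)'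
-- merge-or-append step (shared by _fixed_runs and _rle, which both contain this pattern)
def mergeStep (runs : List (String × Int × Int)) (ch : String) (s e : Int) :
    List (String × Int × Int) :=
  match runs.getLast? with
  | some (c0, s0, e0) =>
    if c0 = ch ∧ e0 + 1 = s then runs.dropLast ++ [(c0, s0, e)] else runs ++ [(ch, s, e)]
  | none => runs ++ [(ch, s, e)]

-- the inner segment loop of _fixed_runs
def runsSegsB (runs : List (String × Int × Int)) :
    List (List Char) → Option (List (String × Int × Int))
  | [] => some runs
  | seg :: rest =>
    match seg with
    | [] => none
    | c :: _ =>
      if PySem.Chars.isalpha c then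
        match parseSeg seg with
        | none => none
        | some (s, e) =>
          if s > e then runsSegsB runs rest
          else runsSegsB (mergeStep runs (String.ofList [c]) s e) rest
      else runsSegsB runs rest

-- the outer chain loop of _fixed_runs
def fixedRunsB (runs : List (String × Int × Int)) :
    List String → Option (List (String × Int × Int))
  | [] => some runs
  | chain :: rest =>
    match runsSegsB runs (seg0 chain.toList) with
    | none => none
    | some runs' => fixedRunsB runs' rest

-- _rle: run-length encode (chain, resnum) pairs, same merge-or-append step
def rleB (runs : List (String × Int × Int)) (pairs : List (String × Int)) :
    List (String × Int × Int) :=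
  pairs.foldl (fun rs p => mergeStep rs p.1 p.2 p.2) runs

def runB (contig_chains : List String) (trb : List (String × Int)) : Option (List String) :=
  match orderedB contig_chains with
  | none => none
  | some ordered =>
    match fixedRunsB [] ordered with
    | none => none
    | some runs =>
      let total := (runs.map (fun r => r.2.2 - r.2.1 + 1)).sum
      if total > PySem.List.len trb then none
      else if rleB [] (PySem.List.slice trb none (some total)) ≠ runs then none
      else some ordered

def order_designed_contig_alt (contig_chains : List String) (trb_ref_pdb_idx : List (String × Int)) : List String :=
  (runB contig_chains trb_ref_pdb_idx).getD []

-- ===== PRECONDITION & SPEC =====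

-- a well-formed segment: atomic under removesuffix/split, nonempty, and parseable when fixed
def wfSegB (seg : List Char) : Bool :=
  decide (seg0 seg = [seg]) &&
    match seg with
    | [] => false
    | c :: _ => !PySem.Chars.isalpha c || (parseSeg seg).isSome

def wfChain (s : String) : Bool := (seg0 s.toList).all wfSegB

-- total is_designed (meaningful on well-formed chains)
def desT (s : String) : Bool := (seg0 s.toList).any (fun seg => !PySem.Chars.isalpha (seg.headD 'A'))

def orderedT (cc : List String) : List String :=
  cc.filter desT ++ cc.filter (fun c => !desT c)

-- expected reference tuples of one segment / one chain / the whole reordered input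
def expSeg (seg : List Char) : List (String × Int) :=
  match seg with
  | [] => []
  | c :: _ =>
    if PySem.Chars.isalpha c then
      match parseSeg seg with
      | some (a, b) => (PySem.List.pyRange a (b + 1) 1).map (fun r => (String.ofList [c], r))
      | none => []
    else []

def expChain (s : String) : List (String × Int) := (seg0 s.toList).flatMap expSeg

def expAll (cc : List String) : List (String × Int) := (orderedT cc).flatMap expChain

-- residue count, computed arithmetically (no list is materialised)
def expSegLen (seg : List Char) : Nat :=
  match seg with
  | [] => 0
  | c :: _ =>
    if PySem.Chars.isalpha c then
      match parseSeg seg with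
      | some (a, b) => (b + 1 - a).toNat
      | none => 0
    else 0

def expLen (cc : List String) : Nat :=
  (((orderedT cc).flatMap (fun s => seg0 s.toList)).map expSegLen).sum

-- length-guarded comparison (guard first, so a huge residue range is never materialised)
def preCmp (cc : List String) (trb : List (String × Int)) : Bool :=
  if expLen cc ≤ trb.length then decide (trb.take (expLen cc) = expAll cc) else false

-- Pre_: exactly the inputs where A returns normally — every segment of every chain is
-- well-formed (else IndexError/ValueError while parsing) and the expected fixed-residue
-- tuples form a prefix of trb_ref_pdb_idx (else the sanity check raises).
def Pre_order_designed_contig (contig_chains : List String) (trb_ref_pdb_idx : List (String × Int)) : Prop :=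
  contig_chains.all wfChain = true ∧ preCmp contig_chains trb_ref_pdb_idx = true
instance (contig_chains : List String) (trb_ref_pdb_idx : List (String × Int)) : Decidable (Pre_order_designed_contig contig_chains trb_ref_pdb_idx) := by unfold Pre_order_designed_contig; infer_instance

def pvWitness_order_designed_contig : List String × (List (String × Int)) :=
  (["10-12/A1-2/0", "B5-6"], [("A", 1), ("A", 2), ("B", 5), ("B", 6)])

def Spec_order_designed_contig (contig_chains : List String) (trb_ref_pdb_idx : List (String × Int)) (out : List String) : Prop := out = order_designed_contig_alt contig_chains trb_ref_pdb_idx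
instance (contig_chains : List String) (trb_ref_pdb_idx : List (String × Int)) (out : List String) : Decidable (Spec_order_designed_contig contig_chains trb_ref_pdb_idx out) := by unfold Spec_order_designed_contig; infer_instance

-- ===== CLAIM (what is proved, stated in full; the proofs are below) =====
def Claim_equal_order_designed_contig : Prop := ∀ (contig_chains : List String) (trb_ref_pdb_idx : List (String × Int)), Dom_order_designed_contig contig_chains trb_ref_pdb_idx → Pre_order_designed_contig contig_chains trb_ref_pdb_idx → Spec_order_designed_contig contig_chains trb_ref_pdb_idx (order_designed_contig contig_chains trb_ref_pdb_idx)

-- ===== LEMMAS AND PROOFS =====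

theorem wfSegB_cases {seg : List Char} (h : wfSegB seg = true) :
    seg0 seg = [seg] ∧ ∃ c rest, seg = c :: rest ∧
      (PySem.Chars.isalpha c = true → (parseSeg seg).isSome = true) := by
  unfold wfSegB at h
  simp only [Bool.and_eq_true, decide_eq_true_eq] at h
  obtain ⟨h1, h2⟩ := h
  refine ⟨h1, ?_⟩
  match seg, h2 with
  | c :: rest, h2 =>
    refine ⟨c, rest, rfl, fun hc => ?_⟩
    simp [hc] at h2
    exact h2

-- A's is_designed on a list of well-formed segments computes the total any-scan
theorem isDesignedLoopA_eq (segs : List (List Char))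
    (h : ∀ seg ∈ segs, wfSegB seg = true) :
    isDesignedLoopA segs = some (segs.any (fun seg => !PySem.Chars.isalpha (seg.headD 'A'))) := by
  induction segs with
  | nil => simp [isDesignedLoopA]
  | cons seg rest ih =>
    obtain ⟨_, c, r, hseg, _⟩ := wfSegB_cases (h seg (by simp))
    subst hseg
    by_cases hc : PySem.Chars.isalpha c = true
    · simp [isDesignedLoopA, hc, ih (fun s hs => h s (by simp [hs]))]
    · simp [isDesignedLoopA, Bool.not_eq_true] at hc ⊢
      simp [hc]

theorem isDesignedA_chain {s : String} (h : wfChain s = true) :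
    isDesignedA s.toList = some (desT s) := by
  unfold wfChain at h
  rw [List.all_eq_true] at h
  exact isDesignedLoopA_eq _ (fun seg hs => h seg hs)

-- B's _is_designed agrees
theorem anyNotAlphaB_eq (segs : List (List Char))
    (h : ∀ seg ∈ segs, wfSegB seg = true) :
    anyNotAlphaB segs = some (segs.any (fun seg => !PySem.Chars.isalpha (seg.headD 'A'))) := by
  induction segs with
  | nil => simp [anyNotAlphaB]
  | cons seg rest ih =>
    obtain ⟨_, c, r, hseg, _⟩ := wfSegB_cases (h seg (by simp))
    subst hseg
    by_cases hc : PySem.Chars.isalpha c = true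
    · simp [anyNotAlphaB, hc, ih (fun s hs => h s (by simp [hs]))]
    · simp [anyNotAlphaB, Bool.not_eq_true] at hc ⊢
      simp [hc]

theorem isDesignedB_chain {s : String} (h : wfChain s = true) :
    isDesignedB s.toList = some (desT s) := by
  unfold wfChain at h
  rw [List.all_eq_true] at h
  exact anyNotAlphaB_eq _ (fun seg hs => h seg hs)

-- A's partition loop
theorem partitionA_eq (cc : List String) (h : ∀ s ∈ cc, wfChain s = true) :
    ∀ des fix, partitionA cc des fix =
      some (des ++ cc.filter desT, fix ++ cc.filter (fun c => !desT c)) := by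
  induction cc with
  | nil => intro des fix; simp [partitionA]
  | cons c rest ih =>
    intro des fix
    have hd := isDesignedA_chain (h c (by simp))
    have ih' := ih (fun s hs => h s (by simp [hs]))
    by_cases hdes : desT c = true
    · simp [partitionA, hd, hdes, ih']
    · simp [Bool.not_eq_true] at hdes
      simp [partitionA, hd, hdes, ih']

-- ----- B side: the stable sort is the designed-first partition -----

-- the decoration of a chain with its 0/1 sort key
def decT (c : String) : Int × String := (if desT c then 0 else 1, c)

theorem decorateB_eq (cc : List String) (h : ∀ s ∈ cc, wfChain s = true) :
    decorateB cc = some (cc.map decT) := by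
  induction cc with
  | nil => simp [decorateB]
  | cons c rest ih =>
    have hd := isDesignedB_chain (h c (by simp))
    simp [decorateB, keyB, hd, ih (fun s hs => h s (by simp [hs])), decT]

theorem insertBy_key0 (x : Int × String) (hx : x.1 = 0) :
    ∀ (D F : List (Int × String)), (∀ p ∈ D, p.1 = 0) → (∀ p ∈ F, p.1 = 1) →
      PySem.List.insertBy (fun a b => decide (a.1 < b.1)) x (D ++ F) = D ++ x :: F := by
  intro D
  induction D with
  | nil =>
    intro F _ hF
    cases F with
    | nil => simp [PySem.List.insertBy]
    | cons q F' =>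
      have hq : q.1 = 1 := hF q (by simp)
      simp [PySem.List.insertBy, hx, hq]
  | cons p D' ih =>
    intro F hD hF
    have hp : p.1 = 0 := hD p (by simp)
    simp [PySem.List.insertBy, hx, hp, ih F (fun q hq => hD q (by simp [hq])) hF]

theorem insertBy_key1 (x : Int × String) (hx : x.1 = 1) :
    ∀ (L : List (Int × String)), (∀ p ∈ L, p.1 = 0 ∨ p.1 = 1) →
      PySem.List.insertBy (fun a b => decide (a.1 < b.1)) x L = L ++ [x] := by
  intro L
  induction L with
  | nil => intro _; simp [PySem.List.insertBy]
  | cons p L' ih =>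
    intro hL
    have hp := hL p (by simp)
    have : ¬ (x.1 < p.1) := by rcases hp with h | h <;> omega
    simp [PySem.List.insertBy, this, ih (fun q hq => hL q (by simp [hq]))]

theorem foldl_insertBy_partition (l : List (Int × String))
    (hl : ∀ p ∈ l, p.1 = 0 ∨ p.1 = 1) :
    ∀ (D F : List (Int × String)), (∀ p ∈ D, p.1 = 0) → (∀ p ∈ F, p.1 = 1) →
      l.foldl (fun acc x => PySem.List.insertBy (fun a b => decide (a.1 < b.1)) x acc) (D ++ F)
        = (D ++ l.filter (fun p => p.1 == 0)) ++ (F ++ l.filter (fun p => p.1 == 1)) := by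
  induction l with
  | nil => intro D F _ _; simp
  | cons x l' ih =>
    intro D F hD hF
    rcases hl x (by simp) with hx | hx
    · rw [List.foldl_cons, insertBy_key0 x hx D F hD hF]
      have : D ++ x :: F = (D ++ [x]) ++ F := by simp
      rw [this, ih (fun p hp => hl p (by simp [hp])) (D ++ [x]) F
        (by intro p hp; rcases List.mem_append.mp hp with h | h
            · exact hD p h
            · simp at h; subst h; exact hx) hF]
      simp [hx]
    · rw [List.foldl_cons, insertBy_key1 x hx (D ++ F)
        (by intro p hp; rcases List.mem_append.mp hp with h | h
            · exact Or.inl (hD p h)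
            · exact Or.inr (hF p h))]
      have : (D ++ F) ++ [x] = D ++ (F ++ [x]) := by simp
      rw [this, ih (fun p hp => hl p (by simp [hp])) D (F ++ [x]) hD
        (by intro p hp; rcases List.mem_append.mp hp with h | h
            · exact hF p h
            · simp at h; subst h; exact hx)]
      simp [hx]

theorem orderedB_eq (cc : List String) (h : ∀ s ∈ cc, wfChain s = true) :
    orderedB cc = some (orderedT cc) := by
  unfold orderedB
  rw [decorateB_eq cc h]
  have hsort := PySem.List.sorted_eq_foldl_insertBy (cc.map decT) (fun p => p.1)
  have hpart := foldl_insertBy_partition (cc.map decT)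
    (by intro p hp
        simp only [List.mem_map] at hp
        obtain ⟨c, _, hc⟩ := hp
        subst hc
        by_cases hdc : desT c = true <;> simp [decT, hdc]) [] []
    (by simp) (by simp)
  simp only [List.nil_append, List.append_nil] at hpart
  have hf0 : (cc.map decT).filter (fun p => p.1 == 0) = (cc.filter desT).map decT := by
    rw [List.filter_map]
    congr 1
    apply List.filter_congr
    intro c _
    by_cases hdc : desT c = true <;> simp [decT, hdc]
  have hf1 : (cc.map decT).filter (fun p => p.1 == 1) = (cc.filter (fun c => !desT c)).map decT := by
    rw [List.filter_map]
    congr 1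
    apply List.filter_congr
    intro c _
    by_cases hdc : desT c = true <;> simp [decT, hdc]
  simp only [hsort, hpart, hf0, hf1, Option.some.injEq]
  unfold orderedT
  simp only [List.map_append, List.map_map]
  simp [Function.comp_def, decT]

-- ----- B side: runs, decoding, canonicity -----

-- the residue tuples a run list stands for
def decodeR (runs : List (String × Int × Int)) : List (String × Int) :=
  runs.flatMap (fun r => (PySem.List.pyRange r.2.1 (r.2.2 + 1) 1).map (fun n => (r.1, n)))

-- canonical: nonempty ranges, and no two adjacent runs mergeable
def CanonR (runs : List (String × Int × Int)) : Prop :=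
  runs.IsChain (fun a b => ¬(a.1 = b.1 ∧ a.2.2 + 1 = b.2.1)) ∧ ∀ r ∈ runs, r.2.1 ≤ r.2.2

theorem mergeStep_spec (runs : List (String × Int × Int)) (ch : String) (s e : Int)
    (hse : s ≤ e) (hc : CanonR runs) :
    CanonR (mergeStep runs ch s e) ∧
      decodeR (mergeStep runs ch s e)
        = decodeR runs ++ (PySem.List.pyRange s (e + 1) 1).map (fun n => (ch, n)) := by
  obtain ⟨hchain, hbnd⟩ := hc
  cases hlast : runs.getLast? with
  | none =>
    have hms : mergeStep runs ch s e = runs ++ [(ch, s, e)] := by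
      simp [mergeStep, hlast]
    rw [List.getLast?_eq_none_iff] at hlast
    subst hlast
    rw [hms]
    refine ⟨⟨?_, ?_⟩, by simp [decodeR]⟩
    · simp
    · intro r hr; simp at hr; subst hr; exact hse
  | some p =>
    obtain ⟨c0, s0, e0⟩ := p
    have hms : mergeStep runs ch s e
        = if c0 = ch ∧ e0 + 1 = s then runs.dropLast ++ [(c0, s0, e)]
          else runs ++ [(ch, s, e)] := by
      simp [mergeStep, hlast]
    obtain ⟨init, hinit⟩ := List.getLast?_eq_some_iff.mp hlast
    by_cases hcond : c0 = ch ∧ e0 + 1 = s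
    · -- merge with the last run
      obtain ⟨hch, hes⟩ := hcond
      subst hch
      subst hes
      rw [hms, if_pos ⟨rfl, rfl⟩]
      subst hinit
      rw [List.dropLast_concat]
      have hs0e0 : s0 ≤ e0 := hbnd (c0, s0, e0) (by simp)
      rw [List.isChain_append] at hchain
      obtain ⟨hc1, _, hc3⟩ := hchain
      constructor
      · constructor
        · rw [List.isChain_append]
          refine ⟨hc1, by simp, ?_⟩
          intro x hx y hy
          simp at hy
          subst hy
          exact hc3 x hx (c0, s0, e0) (by simp)
        · intro r hr
          rcases List.mem_append.mp hr with h' | h'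
          · exact hbnd r (by simp [h'])
          · simp at h'; subst h'
            show s0 ≤ e
            omega
      · unfold decodeR
        rw [List.flatMap_append, List.flatMap_append]
        simp only [List.flatMap_cons, List.flatMap_nil, List.append_nil, List.append_assoc]
        congr 1
        rw [PySem.List.pyRange_one_append s0 (e0 + 1) (e + 1) (by omega) (by omega),
          List.map_append]
    · -- append a fresh run
      rw [hms, if_neg hcond]
      constructor
      · constructor
        · rw [List.isChain_append]
          refine ⟨hchain, by simp, ?_⟩
          intro x hx y hy
          simp at hy
          subst hy
          rw [hlast] at hx
          simp at hx
          subst hx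
          exact hcond
        · intro r hr
          rcases List.mem_append.mp hr with h' | h'
          · exact hbnd r h'
          · simp at h'; subst h'; exact hse
      · unfold decodeR
        rw [List.flatMap_append]
        simp [List.flatMap_cons]

theorem runsSegsB_spec (segs : List (List Char)) (h : ∀ seg ∈ segs, wfSegB seg = true) :
    ∀ runs, CanonR runs →
      ∃ runs', runsSegsB runs segs = some runs' ∧ CanonR runs' ∧
        decodeR runs' = decodeR runs ++ segs.flatMap expSeg := by
  induction segs with
  | nil => intro runs hc; exact ⟨runs, by simp [runsSegsB], hc, by simp⟩
  | cons seg rest ih =>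
    intro runs hc
    have hwf := h seg (by simp)
    obtain ⟨_, c, r, hseg, hp⟩ := wfSegB_cases hwf
    subst hseg
    have ih' := ih (fun t ht => h t (by simp [ht]))
    by_cases hca : PySem.Chars.isalpha c = true
    · obtain ⟨⟨a, b⟩, hab⟩ := Option.isSome_iff_exists.mp (hp hca)
      have hexp : expSeg (c :: r)
          = (PySem.List.pyRange a (b + 1) 1).map (fun x => (String.ofList [c], x)) := by
        simp [expSeg, hca, hab]
      by_cases hab2 : a > b
      · -- empty range: skipped, contributes nothing
        obtain ⟨runs', h1, h2, h3⟩ := ih' runs hc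
        refine ⟨runs', ?_, h2, ?_⟩
        · simp [runsSegsB, hca, hab, hab2, h1]
        · rw [h3, List.flatMap_cons, hexp, PySem.List.pyRange_one_eq_nil (by omega)]
          simp
      · -- fixed segment merged into the runs
        have hale : a ≤ b := by omega
        obtain ⟨hmc, hmd⟩ := mergeStep_spec runs (String.ofList [c]) a b hale hc
        obtain ⟨runs', h1, h2, h3⟩ := ih' (mergeStep runs (String.ofList [c]) a b) hmc
        refine ⟨runs', ?_, h2, ?_⟩
        · simp [runsSegsB, hca, hab, hab2, h1]
        · rw [h3, hmd, List.flatMap_cons, hexp, List.append_assoc]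
    · -- designed segment: skipped
      simp only [Bool.not_eq_true] at hca
      obtain ⟨runs', h1, h2, h3⟩ := ih' runs hc
      refine ⟨runs', ?_, h2, ?_⟩
      · simp [runsSegsB, hca, h1]
      · rw [h3, List.flatMap_cons]
        have : expSeg (c :: r) = [] := by simp [expSeg, hca]
        simp [this]

theorem fixedRunsB_spec (chains : List String) (h : ∀ s ∈ chains, wfChain s = true) :
    ∀ runs, CanonR runs →
      ∃ runs', fixedRunsB runs chains = some runs' ∧ CanonR runs' ∧
        decodeR runs' = decodeR runs ++ chains.flatMap expChain := by
  induction chains with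
  | nil => intro runs hc; exact ⟨runs, by simp [fixedRunsB], hc, by simp⟩
  | cons s rest ih =>
    intro runs hc
    have hsegs : ∀ seg ∈ seg0 s.toList, wfSegB seg = true := by
      have hs := h s (by simp)
      unfold wfChain at hs
      rw [List.all_eq_true] at hs
      exact hs
    obtain ⟨runs1, h1, h2, h3⟩ := runsSegsB_spec (seg0 s.toList) hsegs runs hc
    obtain ⟨runs', h4, h5, h6⟩ := ih (fun t ht => h t (by simp [ht])) runs1 h2
    refine ⟨runs', ?_, h5, ?_⟩
    · simp [fixedRunsB, h1, h4]
    · rw [h6, h3, List.flatMap_cons, List.append_assoc]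
      rfl

-- folding one whole run through _rle appends exactly that run
theorem rleB_run (ch : String) (s : Int) :
    ∀ (n : Nat) (e : Int), e = s + n →
      ∀ runs, (∀ r, runs.getLast? = some r → ¬(r.1 = ch ∧ r.2.2 + 1 = s)) →
        rleB runs ((PySem.List.pyRange s (e + 1) 1).map (fun m => (ch, m))) = runs ++ [(ch, s, e)] := by
  intro n
  induction n with
  | zero =>
    intro e he runs hcompat
    have he' : e = s := by omega
    subst he'
    rw [PySem.List.pyRange_one_singleton]
    cases hlast : runs.getLast? with
    | none => simp [rleB, mergeStep, hlast]
    | some p =>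
      obtain ⟨c0, s0, e0⟩ := p
      have := hcompat (c0, s0, e0) hlast
      simp only [rleB, List.map_cons, List.map_nil, List.foldl_cons, List.foldl_nil]
      simp [mergeStep, hlast, this]
  | succ n ihn =>
    intro e he runs hcompat
    have hse : s ≤ s + n := by omega
    have hsplit : PySem.List.pyRange s (e + 1) 1 = PySem.List.pyRange s (s + n + 1) 1 ++ [s + n + 1] := by
      have : e + 1 = (s + n + 1) + 1 := by omega
      rw [this, PySem.List.pyRange_one_succ_right (by omega)]
    rw [hsplit, List.map_append]
    unfold rleB
    rw [List.foldl_append]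
    have hstep := ihn (s + n) rfl runs hcompat
    unfold rleB at hstep
    rw [hstep]
    simp only [List.map_cons, List.map_nil, List.foldl_cons, List.foldl_nil]
    have hlast : (runs ++ [(ch, s, s + n)]).getLast? = some (ch, s, s + n) := List.getLast?_concat
    have : mergeStep (runs ++ [(ch, s, s + n)]) ch (s + n + 1) (s + n + 1)
        = runs ++ [(ch, s, s + n + 1)] := by
      simp [mergeStep, hlast]
    rw [this]
    have hee : s + (n : Int) + 1 = e := by omega
    rw [hee]

-- _rle is a left inverse of decoding on canonical run lists
theorem rleB_decode (R : List (String × Int × Int)) (hR : CanonR R) :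
    ∀ runs, (∀ r, runs.getLast? = some r →
        ∀ b, R.head? = some b → ¬(r.1 = b.1 ∧ r.2.2 + 1 = b.2.1)) →
      rleB runs (decodeR R) = runs ++ R := by
  induction R with
  | nil => intro runs _; simp [rleB, decodeR]
  | cons r R' ih =>
    intro runs hcompat
    obtain ⟨hchain, hbnd⟩ := hR
    obtain ⟨ch, s, e⟩ := r
    have hse : s ≤ e := hbnd (ch, s, e) (by simp)
    have hdec : decodeR ((ch, s, e) :: R')
        = (PySem.List.pyRange s (e + 1) 1).map (fun m => (ch, m)) ++ decodeR R' := by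
      simp [decodeR]
    rw [hdec]
    unfold rleB
    rw [List.foldl_append]
    have hrun := rleB_run ch s (e - s).toNat e (by omega) runs
      (by intro q hq
          have := hcompat q hq (ch, s, e) rfl
          simpa using this)
    unfold rleB at hrun
    rw [hrun]
    rw [List.isChain_cons] at hchain
    have ih' := ih ⟨hchain.2, fun q hq => hbnd q (by simp [hq])⟩ (runs ++ [(ch, s, e)])
      (by intro q hq b hb
          rw [List.getLast?_concat] at hq
          simp only [Option.some.injEq] at hq
          subst hq
          cases R' with
          | nil => simp at hb
          | cons b' R'' =>
            simp only [List.head?_cons, Option.some.injEq] at hb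
            subst hb
            exact hchain.1 b' (by simp))
    unfold rleB at ih'
    rw [ih']
    simp

-- the arithmetic total equals the decoded length
theorem total_eq_decode_length (R : List (String × Int × Int)) (hR : ∀ r ∈ R, r.2.1 ≤ r.2.2) :
    (R.map (fun r => r.2.2 - r.2.1 + 1)).sum = ((decodeR R).length : Int) := by
  induction R with
  | nil => simp [decodeR]
  | cons r R' ih =>
    obtain ⟨ch, s, e⟩ := r
    have hse : s ≤ e := hR (ch, s, e) (by simp)
    have hlen : decodeR ((ch, s, e) :: R')
        = (PySem.List.pyRange s (e + 1) 1).map (fun m => (ch, m)) ++ decodeR R' := by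
      simp [decodeR]
    rw [hlen]
    simp only [List.map_cons, List.sum_cons, List.length_append, List.length_map,
      PySem.List.length_pyRange_one]
    rw [ih (fun q hq => hR q (by simp [hq]))]
    push_cast
    omega

-- prefix plumbing for A's checker
theorem prefix_append_split {α : Type} {x y z : List α} (h : x ++ y <+: z) :
    x <+: z ∧ y <+: z.drop x.length := by
  obtain ⟨t, ht⟩ := h
  constructor
  · exact ⟨y ++ t, by rw [← ht]; simp⟩
  · refine ⟨t, ?_⟩
    rw [← ht, List.append_assoc, List.drop_left]

theorem prefix_cons_split {α : Type} {e : α} {rest : List α} {z : List α} {i : Nat}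
    (h : e :: rest <+: z.drop i) : z[i]? = some e ∧ rest <+: z.drop (i + 1) := by
  obtain ⟨t, ht⟩ := h
  constructor
  · have : z[i]? = (z.drop i)[0]? := by
      rw [List.getElem?_drop]; rfl
    rw [this, ← ht]
    simp
  · refine ⟨t, ?_⟩
    have : z.drop (i + 1) = (z.drop i).drop 1 := by
      rw [List.drop_drop]
    rw [this, ← ht]
    simp

-- A's innermost residue loop succeeds on a prefix and advances the index by the length
theorem checkRangeA_eq (trb : List (String × Int)) (c : Char) (rs : List Int) :
    ∀ i : Nat, rs.map (fun r => (String.ofList [c], r)) <+: trb.drop i →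
      checkRangeA trb c rs (i : Int) = some ((i + rs.length : Nat) : Int) := by
  induction rs with
  | nil => intro i _; simp [checkRangeA]
  | cons r rs ih =>
    intro i hpre
    rw [List.map_cons] at hpre
    obtain ⟨hget, hrest⟩ := prefix_cons_split hpre
    have hg : PySem.List.pyGet? trb (i : Int) = some (String.ofList [c], r) := by
      rw [PySem.List.pyGet?_natCast]; exact hget
    have hcast : (i : Int) + 1 = ((i + 1 : Nat) : Int) := by push_cast; ring
    have := ih (i + 1) hrest
    simp only [checkRangeA, hg, hcast, this]
    simp only [if_true, Option.some.injEq, List.length_cons]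
    push_cast
    ring

theorem isDesignedA_seg {seg : List Char} (h : wfSegB seg = true) :
    isDesignedA seg = some (!PySem.Chars.isalpha (seg.headD 'A')) := by
  obtain ⟨h1, c, r, hseg, _⟩ := wfSegB_cases h
  unfold isDesignedA
  rw [h1]
  subst hseg
  by_cases hc : PySem.Chars.isalpha c = true
  · simp [isDesignedLoopA, hc]
  · simp [Bool.not_eq_true] at hc
    simp [isDesignedLoopA, hc]

theorem checkSegsA_eq (trb : List (String × Int)) (segs : List (List Char))
    (h : ∀ seg ∈ segs, wfSegB seg = true) :
    ∀ i : Nat, segs.flatMap expSeg <+: trb.drop i →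
      checkSegsA trb segs (i : Int) = some ((i + (segs.flatMap expSeg).length : Nat) : Int) := by
  induction segs with
  | nil => intro i _; simp [checkSegsA]
  | cons seg rest ih =>
    intro i hpre
    have hwf := h seg (by simp)
    obtain ⟨_, c, r, hseg, hp⟩ := wfSegB_cases hwf
    subst hseg
    have hd := isDesignedA_seg hwf
    simp only [List.headD_cons] at hd
    rw [List.flatMap_cons] at hpre
    obtain ⟨hpre1, hpre2⟩ := prefix_append_split hpre
    have hpre2' : List.flatMap expSeg rest <+: trb.drop (i + (expSeg (c :: r)).length) := by
      simpa [List.drop_drop, Nat.add_comm] using hpre2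
    have ih' := ih (fun s hs => h s (by simp [hs]))
    by_cases hc : PySem.Chars.isalpha c = true
    · obtain ⟨⟨a, b⟩, hab⟩ := Option.isSome_iff_exists.mp (hp hc)
      have hd' : isDesignedA (c :: r) = some false := by rw [hd]; simp [hc]
      have hexp : expSeg (c :: r)
          = (PySem.List.pyRange a (b + 1) 1).map (fun x => (String.ofList [c], x)) := by
        simp [expSeg, hc, hab]
      have hrange := checkRangeA_eq trb c (PySem.List.pyRange a (b + 1) 1) i (by rw [← hexp]; exact hpre1)
      have hlen : (expSeg (c :: r)).length = (PySem.List.pyRange a (b + 1) 1).length := by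
        rw [hexp, List.length_map]
      have hrest := ih' (i + (PySem.List.pyRange a (b + 1) 1).length) (by rw [← hlen]; exact hpre2')
      simp only [checkSegsA, hd', hab, hrange, hrest]
      have hfl : (List.flatMap expSeg ((c :: r) :: rest)).length
          = (PySem.List.pyRange a (b + 1) 1).length + (List.flatMap expSeg rest).length := by
        simp [List.flatMap_cons, hexp]
      rw [hfl]
      congr 1
      omega
    · simp only [Bool.not_eq_true] at hc
      have hd' : isDesignedA (c :: r) = some true := by rw [hd]; simp [hc]
      have hexp : expSeg (c :: r) = [] := by simp [expSeg, hc]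
      have hrest := ih' i (by simpa [List.drop_drop, hexp] using hpre2)
      simp only [checkSegsA, hd']
      rw [hrest]
      simp [List.flatMap_cons, hexp]

theorem checkChainsA_eq (trb : List (String × Int)) (chains : List String)
    (h : ∀ s ∈ chains, wfChain s = true) :
    ∀ i : Nat, chains.flatMap expChain <+: trb.drop i →
      checkChainsA trb chains (i : Int) = some ((i + (chains.flatMap expChain).length : Nat) : Int) := by
  induction chains with
  | nil => intro i _; simp [checkChainsA]
  | cons s rest ih =>
    intro i hpre
    have hsegs : ∀ seg ∈ seg0 s.toList, wfSegB seg = true := by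
      have hs := h s (by simp)
      unfold wfChain at hs
      rw [List.all_eq_true] at hs
      exact hs
    rw [List.flatMap_cons] at hpre
    obtain ⟨hpre1, hpre2⟩ := prefix_append_split hpre
    have hpre2' : List.flatMap expChain rest <+: trb.drop (i + (expChain s).length) := by
      simpa [List.drop_drop, Nat.add_comm] using hpre2
    have hflat : (seg0 s.toList).flatMap expSeg = expChain s := rfl
    have h1 := checkSegsA_eq trb (seg0 s.toList) hsegs i (by rw [hflat]; exact hpre1)
    rw [hflat] at h1
    have h2 := ih (fun t ht => h t (by simp [ht])) (i + (expChain s).length) hpre2'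
    simp only [checkChainsA, h1, h2, List.flatMap_cons, List.length_append]
    congr 1
    omega

-- ===== VERDICT (by name: the statement is the Claim_ definition above) =====
theorem order_designed_contig_spec : Claim_equal_order_designed_contig := by
  intro cc trb _ hpre
  obtain ⟨hwf, hcmp⟩ := hpre
  rw [List.all_eq_true] at hwf
  have hle : expLen cc ≤ trb.length ∧ trb.take (expLen cc) = expAll cc := by
    unfold preCmp at hcmp
    split at hcmp
    · exact ⟨by assumption, of_decide_eq_true hcmp⟩
    · exact absurd hcmp (by simp)
  obtain ⟨hlen, htake⟩ := hle
  have hprefix : expAll cc <+: trb := by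
    rw [← htake]; exact List.take_prefix _ _
  have hmemO : ∀ s ∈ orderedT cc, wfChain s = true := by
    intro s hs
    unfold orderedT at hs
    rcases List.mem_append.mp hs with h' | h'
    · exact hwf s (List.mem_of_mem_filter h')
    · exact hwf s (List.mem_of_mem_filter h')
  have hdrop0 : (orderedT cc).flatMap expChain <+: trb.drop 0 := by
    rw [List.drop_zero]; exact hprefix
  have hord : cc.filter desT ++ cc.filter (fun c => !desT c) = orderedT cc := rfl
  -- A's side returns the reordered chains
  have hA : order_designed_contig cc trb = orderedT cc := by
    unfold order_designed_contig runA
    rw [partitionA_eq cc hwf [] []]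
    have hchk := checkChainsA_eq trb (orderedT cc) hmemO 0 hdrop0
    simp only [Nat.cast_zero] at hchk
    simp only [List.nil_append, hord, hchk]
    rfl
  -- B's side returns the same reordered chains
  have hB : order_designed_contig_alt cc trb = orderedT cc := by
    unfold order_designed_contig_alt runB
    rw [orderedB_eq cc hwf]
    obtain ⟨R, hRrun, hRcanon, hRdec⟩ :=
      fixedRunsB_spec (orderedT cc) hmemO [] ⟨List.IsChain.nil, by simp⟩
    have hRdec' : decodeR R = expAll cc := by
      rw [hRdec]; rfl
    have hexplen : (expAll cc).length = expLen cc := by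
      have := congrArg List.length htake
      rw [List.length_take] at this
      omega
    have htot : (R.map (fun r => r.2.2 - r.2.1 + 1)).sum = ((expAll cc).length : Int) := by
      rw [total_eq_decode_length R hRcanon.2, hRdec']
    have hng : ¬ ((R.map (fun r => r.2.2 - r.2.1 + 1)).sum > PySem.List.len trb) := by
      rw [htot, PySem.List.len_eq]
      omega
    have hslice : PySem.List.slice trb none (some ((R.map (fun r => r.2.2 - r.2.1 + 1)).sum))
        = expAll cc := by
      rw [htot, PySem.List.slice_to _ (by positivity), Int.toNat_natCast, hexplen, htake]
    have hrle : rleB [] (expAll cc) = R := by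
      rw [← hRdec', rleB_decode R hRcanon [] (by intro r hr; simp at hr)]
      simp
    simp only [hRrun, hng, if_false, hslice, hrle, ne_eq, not_true_eq_false,
      Option.getD_some]
  unfold Spec_order_designed_contig
  rw [hA, hB]
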